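-- pv_equiv track=rewrite | github.com/hurni/automate_report_opendataswiss | create_report.py | get_max_resources
-- ===== SOURCE A (Python) =====
-- def get_max_resources(results):
--     max_resources = 0
--     total_resources = 0
--     for nr, item in enumerate(results):
--         x = results[nr]["num_resources"]
--         total_resources = total_resources + x
--         if x > max_resources:
--             max_resources = x
--         else:
--             continue
--
--     return max_resources, total_resources
-- ===== SOURCE B (Python) =====
-- def get_max_resources(results):
--     vals = sorted((r["num_resources"] for r in results), reverse=True)
--     total_resources = sum(vals)
--     max_resources = vals[0] if vals and vals[0] > 0 else 0
--     return max_resources, total_resources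
-- ===== Notes on version B (the rewrite author's own statement) =====
-- stated objective: alternative
-- what changed: Replaces the fused running-max/total loop by sorting the value list descending and taking its head (clamped at 0) as the max, with the total as a sum over the sorted list.
import Mathlib
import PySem

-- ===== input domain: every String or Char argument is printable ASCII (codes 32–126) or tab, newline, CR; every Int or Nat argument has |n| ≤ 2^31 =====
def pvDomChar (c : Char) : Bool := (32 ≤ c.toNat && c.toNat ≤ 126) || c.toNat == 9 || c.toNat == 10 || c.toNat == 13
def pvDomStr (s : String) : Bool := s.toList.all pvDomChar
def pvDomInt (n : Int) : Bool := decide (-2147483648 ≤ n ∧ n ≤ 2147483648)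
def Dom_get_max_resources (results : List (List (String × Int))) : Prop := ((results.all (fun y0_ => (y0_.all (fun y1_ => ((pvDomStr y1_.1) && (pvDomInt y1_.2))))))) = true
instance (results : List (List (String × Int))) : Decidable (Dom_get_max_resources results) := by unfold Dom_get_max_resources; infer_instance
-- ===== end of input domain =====

-- B replaces A's fused running-max/total loop by sorting the values descending and taking the head (clamped at 0) as the max, with the total as a sum over the sorted list.

-- ===== PORT A =====
-- r["num_resources"]: getD 0 is exact under Pre_ (key present in every item)
def get_max_resources (results : List (List (String × Int))) : Int × Int :=
  (PySem.List.enumerate results).foldl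
    (fun (st : Int × Int) p =>
      let x := (PySem.Dict.mk ((PySem.List.pyGet? results p.1).getD [])).getD "num_resources" 0
      (if x > st.1 then x else st.1, st.2 + x))
    (0, 0)

-- ===== PORT B =====
def get_max_resources_alt (results : List (List (String × Int))) : Int × Int :=
  let vals := PySem.List.sorted (results.map (fun r => (PySem.Dict.mk r).getD "num_resources" 0)) (fun y => y) true
  let total_resources := vals.foldl (· + ·) 0
  let max_resources : Int :=
    match vals with
    | [] => 0
    | m :: _ => if m > 0 then m else 0
  (max_resources, total_resources)

-- ===== PRECONDITION & SPEC =====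
-- Pre_ excludes inputs where some item lacks the "num_resources" key: A raises KeyError there.
def Pre_get_max_resources (results : List (List (String × Int))) : Prop :=
  ∀ r ∈ results, (PySem.Dict.mk r).contains "num_resources" = true
instance (results : List (List (String × Int))) : Decidable (Pre_get_max_resources results) := by unfold Pre_get_max_resources; infer_instance
def pvWitness_get_max_resources : (List (List (String × Int))) := [[("num_resources", 3)], [("num_resources", -1)]]

def Spec_get_max_resources (results : List (List (String × Int))) (out : Int × Int) : Prop := out = get_max_resources_alt results
instance (results : List (List (String × Int))) (out : Int × Int) : Decidable (Spec_get_max_resources results out) := by unfold Spec_get_max_resources; infer_instance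

-- ===== CLAIM (what is proved, stated in full; the proofs are below) =====
def Claim_equal_get_max_resources : Prop := ∀ (results : List (List (String × Int))), Dom_get_max_resources results → Pre_get_max_resources results → Spec_get_max_resources results (get_max_resources results)

-- ===== LEMMAS AND PROOFS =====

-- A's loop body: running max and running total of x
def pvStep (st : Int × Int) (x : Int) : Int × Int := (if x > st.1 then x else st.1, st.2 + x)

-- A's loop reads results[nr] for (nr, item) in enumerate(results): the indexed read is item itself.
theorem pv_foldA_congr (results : List (List (String × Int))) :
    get_max_resources results =
    (PySem.List.enumerate results).foldl
      (fun st p => pvStep st ((PySem.Dict.mk p.2).getD "num_resources" 0)) (0, 0) := by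
  unfold get_max_resources
  apply PySem.List.foldl_congr_mem
  intro st p hp
  obtain ⟨k, hk, rfl⟩ := (PySem.List.mem_enumerate_iff results 0 p).mp hp
  simp [PySem.List.pyGet?_natCast, pvStep, List.getElem?_eq_getElem hk]

-- the index is unused, so the fold over enumerate is the fold over the items
theorem pv_fold_enum (xs : List (List (String × Int))) :
    ∀ (s : Int) (init : Int × Int),
    (PySem.List.enumerate xs s).foldl
        (fun st p => pvStep st ((PySem.Dict.mk p.2).getD "num_resources" 0)) init =
    xs.foldl (fun st r => pvStep st ((PySem.Dict.mk r).getD "num_resources" 0)) init := by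
  induction xs with
  | nil => intro s init; simp [PySem.List.enumerate_nil]
  | cons x t ih => intro s init; simp only [PySem.List.enumerate_cons, List.foldl]; exact ih _ _

-- the fused loop computes the running max and the sum in one pass
theorem pv_fold_main (vals : List Int) :
    ∀ (m t : Int),
    vals.foldl pvStep (m, t) = (vals.foldl max m, t + vals.sum) := by
  induction vals with
  | nil => intro m t; simp
  | cons x rest ih =>
    intro m t
    simp only [List.foldl, List.sum_cons, pvStep]
    rw [ih]
    have h1 : (if x > m then x else m) = max m x := by omega
    rw [h1]; ring_nf

-- folding max over a list dominated by the seed leaves the seed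
theorem pv_foldl_max_of_le (l : List Int) :
    ∀ (a : Int), (∀ y ∈ l, y ≤ a) → l.foldl max a = a := by
  induction l with
  | nil => intro a _; rfl
  | cons x t ih =>
    intro a h
    have hx : x ≤ a := h x (by simp)
    simp only [List.foldl]
    rw [max_eq_left hx]
    exact ih a (fun y hy => h y (by simp [hy]))

-- running max from seed a of a list whose greatest member is m
theorem pv_foldl_max_eq (l : List Int) (m : Int) :
    m ∈ l → (∀ y ∈ l, y ≤ m) → ∀ a : Int, l.foldl max a = max a m := by
  induction l with
  | nil => intro h; simp at h
  | cons x t ih =>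
    intro hm hle a
    simp only [List.foldl]
    rcases List.mem_cons.mp hm with rfl | hmt
    · by_cases ht : m ∈ t
      · rw [ih ht (fun y hy => hle y (by simp [hy])) (max a m), max_assoc, max_self]
      · rw [pv_foldl_max_of_le t (max a m)
            (fun y hy => le_trans (hle y (by simp [hy])) (le_max_right a m))]
    · have hx : x ≤ m := hle x (by simp)
      rw [ih hmt (fun y hy => hle y (by simp [hy])) (max a x)]
      omega

-- ===== VERDICT (by name: the statement is the Claim_ definition above) =====
theorem get_max_resources_spec : Claim_equal_get_max_resources := by
  intro results _hdom _hpre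
  unfold Spec_get_max_resources get_max_resources_alt
  dsimp only []
  rw [pv_foldA_congr, pv_fold_enum, ← List.foldl_map, pv_fold_main]
  set vals := results.map (fun r => (PySem.Dict.mk r).getD "num_resources" 0) with hv
  have hperm : (PySem.List.sorted vals (fun y => y) true).Perm vals :=
    PySem.List.sorted_perm vals (fun y => y) true
  have hsum : (PySem.List.sorted vals (fun y => y) true).foldl (· + ·) 0 = vals.sum := by
    rw [show ((PySem.List.sorted vals (fun y => y) true).foldl (· + ·) 0
          = (PySem.List.sorted vals (fun y => y) true).sum) from by
        simpa using PySem.List.foldl_add (PySem.List.sorted vals (fun y => y) true) (fun x => x) 0]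
    exact hperm.sum_eq
  rcases hs : PySem.List.sorted vals (fun y => y) true with _ | ⟨m, t⟩
  · have : vals = [] := by
      have := hperm; rw [hs] at this; exact this.symm.eq_nil
    simp [this]
  · have hmem : m ∈ vals := by
      have : m ∈ PySem.List.sorted vals (fun y => y) true := by rw [hs]; simp
      exact hperm.mem_iff.mp this
    have hle : ∀ y ∈ vals, y ≤ m :=
      PySem.List.key_head_sorted_rev_ge vals (fun y => y) hs
    rw [hs] at hsum
    rw [pv_foldl_max_eq vals m hmem hle 0, ← hsum]
    have : max 0 m = if m > 0 then m else 0 := by omega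
    simp [this]
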